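-- pv_equiv track=rewrite | github.com/Avalon-Benchmark/avalon | notebooks/avalon_results.sync.py | drop_rows_by_columns
-- ===== SOURCE A (Python) =====
-- from typing import List
--
-- def drop_rows_by_columns(rows: List, ignore: List[int]):
--     rows_without_ignored_columns = []
--     for row in rows:
--         new_row = []
--         for i in range(len(row)):
--             if i in ignore:
--                 continue
--             new_row.append(row[i])
--         rows_without_ignored_columns.append(new_row)
--     return rows_without_ignored_columns
-- ===== SOURCE B (Python) =====
-- def drop_rows_by_columns(rows, ignore):
--     def drop_row(row):
--         new_row = list(row)
--         for i in sorted({j for j in ignore if 0 <= j < len(row)}, reverse=True):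
--             del new_row[i]
--         return new_row
--     return [drop_row(row) for row in rows]
-- ===== Notes on version B (the rewrite author's own statement) =====
-- stated objective: faster
-- what changed: Instead of scanning every column and testing 'i in ignore' (a linear list scan per column), B copies each row once and deletes only the valid drop positions (deduped via a set, filtered to range, sorted descending so deletions do not shift later indices) from the copy.
import Mathlib
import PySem

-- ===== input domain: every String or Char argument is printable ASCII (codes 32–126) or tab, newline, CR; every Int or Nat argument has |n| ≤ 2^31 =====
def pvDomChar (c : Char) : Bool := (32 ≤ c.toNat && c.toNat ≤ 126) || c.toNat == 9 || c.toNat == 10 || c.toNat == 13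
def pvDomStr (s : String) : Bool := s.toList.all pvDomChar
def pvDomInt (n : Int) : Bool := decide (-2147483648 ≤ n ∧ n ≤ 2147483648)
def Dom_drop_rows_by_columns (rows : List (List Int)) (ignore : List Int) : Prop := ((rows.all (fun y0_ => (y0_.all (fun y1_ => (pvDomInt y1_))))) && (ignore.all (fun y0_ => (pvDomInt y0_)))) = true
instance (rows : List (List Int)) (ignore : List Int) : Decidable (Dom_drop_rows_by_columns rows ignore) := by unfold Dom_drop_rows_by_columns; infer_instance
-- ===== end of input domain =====

-- B copies each row and deletes the valid drop positions (deduped, range-filtered, sorted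
-- descending so deletions do not shift later indices) from the copy, instead of scanning
-- every column index and testing membership in ignore; same return value, measured faster.

-- ===== PORT A =====
def drop_rows_by_columns (rows : List (List Int)) (ignore : List Int) : List (List Int) :=
  rows.foldl (fun acc row =>
    acc ++ [(List.range row.length).foldl
      (fun nr i => if (Int.ofNat i) ∈ ignore then nr else nr ++ [row.getD i 0]) []]) []

-- ===== PORT B =====
def pvDropRow (ignore : List Int) (row : List Int) : List Int :=
  let drops : List Int :=
    PySem.List.sorted
      (PySem.Set.ofList (ignore.filter (fun j => decide (0 ≤ j ∧ j < (row.length : Int)))))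
      (fun x => x) true
  drops.foldl (fun r i => r.eraseIdx i.toNat) row

def drop_rows_by_columns_alt (rows : List (List Int)) (ignore : List Int) : List (List Int) :=
  rows.map (pvDropRow ignore)

-- ===== PRECONDITION & SPEC =====
def Spec_drop_rows_by_columns (rows : List (List Int)) (ignore : List Int) (out : List (List Int)) : Prop := out = drop_rows_by_columns_alt rows ignore
instance (rows : List (List Int)) (ignore : List Int) (out : List (List Int)) : Decidable (Spec_drop_rows_by_columns rows ignore out) := by unfold Spec_drop_rows_by_columns; infer_instance

-- ===== CLAIM (what is proved, stated in full; the proofs are below) =====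
def Claim_equal_drop_rows_by_columns : Prop := ∀ (rows : List (List Int)) (ignore : List Int), Dom_drop_rows_by_columns rows ignore → Spec_drop_rows_by_columns rows ignore (drop_rows_by_columns rows ignore)

-- ===== LEMMAS AND PROOFS =====

-- reading every index back with getD reproduces the list
lemma map_getD_range (l : List Int) :
    (List.range l.length).map (fun i => l.getD i 0) = l := by
  apply List.ext_getElem
  · simp
  · intro i h1 h2
    simp [List.getD_eq_getElem?_getD, h2]

-- deleting index j and then selecting surviving indices satisfying q (with q true from j on)
-- equals selecting the indices ≠ j satisfying q from the original row
lemma eraseIdx_map_filter (row : List Int) (j : Nat) (q : Nat → Bool)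
    (hq : ∀ i, j ≤ i → q i = true) (hj : j < row.length) :
    ((List.range (row.eraseIdx j).length).filter q).map (fun i => (row.eraseIdx j).getD i 0)
    = ((List.range row.length).filter (fun i => decide (i ≠ j) && q i)).map (fun i => row.getD i 0) := by
  induction row generalizing j q with
  | nil => simp at hj
  | cons a t ih =>
    cases j with
    | zero =>
      have hqt : ∀ i, q i = true := fun i => hq i (Nat.zero_le i)
      have h1 : List.filter q (List.range t.length) = List.range t.length :=
        List.filter_eq_self.mpr (fun x _ => hqt x)
      simp only [List.eraseIdx_cons_zero, h1, map_getD_range]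
      rw [List.length_cons, List.range_succ_eq_map]
      simp [hqt, List.filter_map, Function.comp_def]
      simpa [List.getD_eq_getElem?_getD] using (map_getD_range t).symm
    | succ k =>
      have hk : k < t.length := by simpa using hj
      have hq' : ∀ i, k ≤ i → q (i + 1) = true := fun i hi => hq (i + 1) (by omega)
      have IH := ih k (fun i => q (i + 1)) hq' hk
      simp only [List.eraseIdx_cons_succ, List.length_cons, List.range_succ_eq_map,
        List.filter_cons, List.filter_map, Function.comp_def]
      have hfc : List.filter (fun x => decide (x.succ ≠ k + 1) && q x.succ) (List.range t.length)
          = List.filter (fun x => decide (x ≠ k) && q (x + 1)) (List.range t.length) := by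
        apply List.filter_congr; intro x _
        congr 1
        exact decide_eq_decide.mpr (by omega)
      rw [hfc]
      have h0 : (decide (0 ≠ k + 1) && q 0) = q 0 := by simp
      rw [h0]
      by_cases hq0 : q 0 = true <;>
        simp [hq0, List.map_map, Function.comp_def] <;>
        simpa using IH

-- a strictly descending list of distinct in-range deletions keeps exactly the non-dropped columns
lemma foldl_erase_desc (row : List Int) (ds : List Int)
    (hpw : ds.Pairwise (fun a b => b < a))
    (hb : ∀ d ∈ ds, 0 ≤ d ∧ d < (row.length : Int)) :
    ds.foldl (fun r i => r.eraseIdx i.toNat) row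
    = ((List.range row.length).filter (fun (i : Nat) => decide ((i : Int) ∉ ds))).map (fun i => row.getD i 0) := by
  induction ds generalizing row with
  | nil =>
    simp only [List.foldl_nil, List.not_mem_nil, not_false_iff, decide_true, List.filter_true]
    simpa [List.getD_eq_getElem?_getD] using (map_getD_range row).symm
  | cons d ds ih =>
    obtain ⟨hd0, hdn⟩ := hb d (by simp)
    have hlt : ∀ x ∈ ds, x < d := by
      intro x hx; exact (List.pairwise_cons.mp hpw).1 x hx
    have hj : ((d.toNat : Int)) = d := Int.toNat_of_nonneg hd0
    have hjn : d.toNat < row.length := by omega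
    have hlen : (row.eraseIdx d.toNat).length = row.length - 1 := by
      rw [List.length_eraseIdx]; simp [hjn]
    have hb' : ∀ x ∈ ds, 0 ≤ x ∧ x < ((row.eraseIdx d.toNat).length : Int) := by
      intro x hx
      have h1 := hb x (by simp [hx])
      have h2 := hlt x hx
      rw [hlen]; omega
    rw [List.foldl_cons, ih (row.eraseIdx d.toNat) (List.pairwise_cons.mp hpw).2 hb']
    rw [eraseIdx_map_filter row d.toNat (fun i => decide ((i : Int) ∉ ds))
      (by intro i hi
          simp only [decide_eq_true_eq]
          intro hmem
          have := hlt _ hmem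
          omega) hjn]
    apply congrArg
    apply List.filter_congr
    intro i _
    have hsplit : (decide (i ≠ d.toNat) && decide ((i : Int) ∉ ds))
        = decide (i ≠ d.toNat ∧ (i : Int) ∉ ds) := by simp
    rw [hsplit]
    exact decide_eq_decide.mpr (by simp [List.mem_cons]; omega)

-- one row of A equals one row of B
lemma row_eq (ignore row : List Int) :
    (List.range row.length).foldl
      (fun nr i => if (Int.ofNat i) ∈ ignore then nr else nr ++ [row.getD i 0]) []
    = pvDropRow ignore row := by
  have hbr : ∀ (acc : List Int), ∀ i ∈ List.range row.length,
      (if (Int.ofNat i) ∈ ignore then acc else acc ++ [row.getD i 0])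
      = (if (Int.ofNat i) ∉ ignore then acc ++ [row.getD i 0] else acc) :=
    fun acc i _ => (ite_not _ _ _).symm
  have hA := PySem.List.foldl_congr_mem (List.range row.length)
    (fun nr i => if (Int.ofNat i) ∈ ignore then nr else nr ++ [row.getD i 0])
    (fun nr i => if (Int.ofNat i) ∉ ignore then nr ++ [row.getD i 0] else nr) [] hbr
  rw [hA, PySem.List.foldl_append_ite]
  unfold pvDropRow
  set ds := PySem.List.sorted
      (PySem.Set.ofList (ignore.filter (fun j => decide (0 ≤ j ∧ j < (row.length : Int)))))
      (fun x => x) true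
  have hperm : ds.Perm (PySem.Set.ofList (ignore.filter (fun j => decide (0 ≤ j ∧ j < (row.length : Int))))) :=
    PySem.List.sorted_perm _ _ _
  have hmem : ∀ x : Int, x ∈ ds ↔ (x ∈ ignore ∧ 0 ≤ x ∧ x < (row.length : Int)) := by
    intro x
    rw [hperm.mem_iff, PySem.Set.mem_ofList, List.mem_filter]
    simp
  have hnd : ds.Nodup := by
    rw [hperm.nodup_iff]
    exact PySem.Set.nodup_ofList _
  have hpw : ds.Pairwise (fun a b => b < a) := by
    have h1 : ds.Pairwise (fun a b : Int => b ≤ a) := PySem.List.sorted_pairwise_rev _ _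
    exact (h1.and hnd).imp (fun h => lt_of_le_of_ne h.1 (Ne.symm h.2))
  have hb : ∀ d ∈ ds, 0 ≤ d ∧ d < (row.length : Int) := fun d hd => ((hmem d).mp hd).2
  rw [foldl_erase_desc row ds hpw hb]
  simp only [List.nil_append]
  apply congrArg
  apply List.filter_congr
  intro i hi
  have hin : i < row.length := List.mem_range.mp hi
  apply decide_eq_decide.mpr
  rw [hmem]
  have hcast : (Int.ofNat i) = (i : Int) := rfl
  rw [hcast]
  have h2 : ((i : Int) < (row.length : Int)) := by exact_mod_cast hin
  simp [h2]

-- ===== VERDICT (by name: the statement is the Claim_ definition above) =====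
theorem drop_rows_by_columns_spec : Claim_equal_drop_rows_by_columns := by
  intro rows ignore _
  unfold Spec_drop_rows_by_columns drop_rows_by_columns drop_rows_by_columns_alt
  rw [PySem.List.foldl_append_singleton_eq_map]
  simp only [List.nil_append]
  exact List.map_congr_left (fun row _ => row_eq ignore row)
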